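-- pv_equiv track=rewrite | github.com/gelineau/cours-algo-bsi | 2025-2026/cours 1/corrections/correction_lists.py | remove_every_5th_word
-- ===== SOURCE A (Python) =====
-- def remove_every_5th_word(sentence: str) -> list[str]:
--     """return all words except the 5th, 10th, etc."""
--     result = []
--     words = sentence.split()
--     for i, word in enumerate(words):
--         if (i + 1) % 5 == 0:
--             continue
--         result.append(word)
--     return result
-- ===== SOURCE B (Python) =====
-- def remove_every_5th_word(sentence: str) -> list[str]:
--     """return all words except the 5th, 10th, etc."""
--     result = []
--     words = sentence.split()
--     while words:
--         result += words[:4]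
--         words = words[5:]
--     return result
-- ===== Notes on version B (the rewrite author's own statement) =====
-- stated objective: alternative
-- what changed: Replaces the per-word enumerate loop with its (i+1)%5 test by a while loop that consumes the word list five at a time, appending words[:4] and dropping to words[5:], so no index or modulo is computed.
import Mathlib
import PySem

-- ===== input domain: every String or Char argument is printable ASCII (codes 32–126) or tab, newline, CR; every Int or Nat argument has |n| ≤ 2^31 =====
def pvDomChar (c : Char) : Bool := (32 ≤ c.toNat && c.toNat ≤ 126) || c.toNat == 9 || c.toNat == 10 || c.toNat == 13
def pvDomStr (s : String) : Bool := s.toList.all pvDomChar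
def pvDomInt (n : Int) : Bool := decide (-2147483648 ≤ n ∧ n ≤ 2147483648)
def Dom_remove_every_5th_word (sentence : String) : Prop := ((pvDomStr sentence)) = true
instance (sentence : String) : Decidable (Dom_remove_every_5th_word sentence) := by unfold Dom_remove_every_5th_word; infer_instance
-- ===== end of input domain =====

-- B replaces the per-word enumerate/modulo loop by a while loop consuming the word list in chunks of five (keep words[:4], drop to words[5:]); same cost, different decomposition.


-- ===== PORT A =====
def remove_every_5th_word (sentence : String) : List String :=
  let words := PySem.Str.split₀ sentence
  (PySem.List.enumerate words 0).foldl
    (fun result p => if PySem.Int.mod (p.1 + 1) 5 == 0 then result else result ++ [p.2]) []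

-- ===== PORT B =====
-- 'while words: result += words[:4]; words = words[5:]'
def pvAltLoop (result : List String) (words : List String) : List String :=
  if words = [] then result
  else pvAltLoop (result ++ PySem.List.slice words none (some 4))
                 (PySem.List.slice words (some 5) none)
termination_by words.length
decreasing_by
  rw [PySem.List.slice_from _ (by norm_num)]
  have : words.length ≠ 0 := fun hl => (by simp_all : False)
  simp only [List.length_drop]
  omega

def remove_every_5th_word_alt (sentence : String) : List String :=
  pvAltLoop [] (PySem.Str.split₀ sentence)

-- ===== PRECONDITION & SPEC =====
def Spec_remove_every_5th_word (sentence : String) (out : List String) : Prop := out = remove_every_5th_word_alt sentence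
instance (sentence : String) (out : List String) : Decidable (Spec_remove_every_5th_word sentence out) := by unfold Spec_remove_every_5th_word; infer_instance

-- ===== CLAIM (what is proved, stated in full; the proofs are below) =====
def Claim_equal_remove_every_5th_word : Prop := ∀ (sentence : String), Dom_remove_every_5th_word sentence → Spec_remove_every_5th_word sentence (remove_every_5th_word sentence)

-- ===== LEMMAS AND PROOFS =====

theorem pvMod5 (a : Int) : PySem.Int.mod a 5 = a % 5 :=
  PySem.Int.mod_eq_emod_of_pos (by norm_num)

theorem pvAltLoop_nil (result : List String) : pvAltLoop result [] = result := by
  rw [pvAltLoop]; simp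

theorem pvAltLoop_cons (result : List String) (w : List String) (h : w ≠ []) :
    pvAltLoop result w = pvAltLoop (result ++ w.take 4) (w.drop 5) := by
  rw [pvAltLoop]
  simp [h, PySem.List.slice_from _ (by norm_num : (0:Int) ≤ 5),
        PySem.List.slice_to _ (by norm_num : (0:Int) ≤ 4)]

theorem pvCore (n : Nat) : ∀ (l : List String) (s : Int) (acc : List String),
    l.length ≤ n → s % 5 = 0 →
    (PySem.List.enumerate l s).foldl
      (fun result p => if PySem.Int.mod (p.1 + 1) 5 == 0 then result else result ++ [p.2]) acc
      = pvAltLoop acc l := by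
  induction n with
  | zero =>
    intro l s acc hl _
    have : l = [] := List.eq_nil_of_length_eq_zero (Nat.le_zero.mp hl)
    subst this
    simp [PySem.List.enumerate, pvAltLoop_nil]
  | succ n ih =>
    intro l s acc hl hs
    have e1 : (PySem.Int.mod (s + 1) 5 == 0) = false := by
      rw [pvMod5]; simp; omega
    have e2 : (PySem.Int.mod (s + 1 + 1) 5 == 0) = false := by
      rw [pvMod5]; simp; omega
    have e3 : (PySem.Int.mod (s + 1 + 1 + 1) 5 == 0) = false := by
      rw [pvMod5]; simp; omega
    have e4 : (PySem.Int.mod (s + 1 + 1 + 1 + 1) 5 == 0) = false := by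
      rw [pvMod5]; simp; omega
    have e5 : (PySem.Int.mod (s + 1 + 1 + 1 + 1 + 1) 5 == 0) = true := by
      rw [pvMod5]; simp; omega
    match l with
    | [] => simp [PySem.List.enumerate, pvAltLoop_nil]
    | [a] =>
      rw [pvAltLoop_cons _ _ (by simp)]
      simp only [PySem.List.enumerate_cons, PySem.List.enumerate_nil, List.foldl,
                 e1, Bool.false_eq_true, if_false]
      simp [pvAltLoop_nil]
    | [a, b] =>
      rw [pvAltLoop_cons _ _ (by simp)]
      simp only [PySem.List.enumerate_cons, PySem.List.enumerate_nil, List.foldl,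
                 e1, e2, Bool.false_eq_true, if_false]
      simp [pvAltLoop_nil]
    | [a, b, c] =>
      rw [pvAltLoop_cons _ _ (by simp)]
      simp only [PySem.List.enumerate_cons, PySem.List.enumerate_nil, List.foldl,
                 e1, e2, e3, Bool.false_eq_true, if_false]
      simp [pvAltLoop_nil]
    | [a, b, c, d] =>
      rw [pvAltLoop_cons _ _ (by simp)]
      simp only [PySem.List.enumerate_cons, PySem.List.enumerate_nil, List.foldl,
                 e1, e2, e3, e4, Bool.false_eq_true, if_false]
      simp [pvAltLoop_nil]
    | a :: b :: c :: d :: e :: rest =>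
      rw [pvAltLoop_cons _ _ (by simp)]
      simp only [PySem.List.enumerate_cons, List.foldl,
                 e1, e2, e3, e4, e5, Bool.false_eq_true, if_false, if_true]
      have h5 : s + 1 + 1 + 1 + 1 + 1 = s + 5 := by ring
      have hacc : acc ++ [a] ++ [b] ++ [c] ++ [d]
          = acc ++ (a :: b :: c :: d :: e :: rest).take 4 := by simp
      rw [h5, hacc,
          ih rest (s + 5) _ (by simp at hl ⊢; omega) (by omega)]
      simp

-- ===== VERDICT (by name: the statement is the Claim_ definition above) =====
theorem remove_every_5th_word_spec : Claim_equal_remove_every_5th_word := by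
  intro sentence _
  unfold Spec_remove_every_5th_word remove_every_5th_word remove_every_5th_word_alt
  exact pvCore (PySem.Str.split₀ sentence).length _ 0 [] le_rfl (by decide)
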